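-- pv_equiv track=rewrite | github.com/ToniusRetonius/AlgoI | Pyhton/cms2/sePuedeLlegar entregado.py | buscarRuta
-- ===== SOURCE A (Python) =====
-- from typing import List
-- from typing import Tuple
--
-- def buscarRuta(origen: str,destino: str,vuelos: List[Tuple[str]], visitados: List[str], ruta: List[Tuple[str]]) -> bool:
--   visitados.append(origen)
--   if origen == destino:
--     return True
--
--   for vuelo in vuelos:
--     if vuelo[0] == origen and vuelo[1] not in visitados:
--       ruta.append(vuelo)
--       if buscarRuta(vuelo[1], destino, vuelos, visitados, ruta):
--         return True
--       ruta.pop()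
--
--   return False
-- ===== SOURCE B (Python) =====
-- def buscarRuta(origen, destino, vuelos, visitados, ruta):
--     # Iterative DFS over a precomputed adjacency dict with a seen set.
--     # Note: unlike A, this does not mutate visitados/ruta; equivalence is about the return value.
--     if origen == destino:
--         return True
--     adj = {}
--     for v in vuelos:
--         adj.setdefault(v[0], []).append(v[1])
--     seen = set(visitados)
--     seen.add(origen)
--     stack = [origen]
--     while stack:
--         node = stack.pop()
--         for nxt in adj.get(node, []):
--             if nxt not in seen:
--                 if nxt == destino:
--                     return True
--                 seen.add(nxt)
--                 stack.append(nxt)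
--     return False
-- ===== Notes on version B (the rewrite author's own statement) =====
-- stated objective: alternative
-- what changed: Replaces A's recursive DFS that rescans the whole flight list (with O(n) list membership) at every visited node by an iterative stack DFS over an adjacency dict built once, with a set of seen nodes; same worst-case-better cost class but not measurably faster on the generated inputs.
-- outside the precondition, e.g. on buscarRuta('a', 'b', [('x', 'a'), ('c',)], [], []): A returns False, B raises IndexError
import Mathlib
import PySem

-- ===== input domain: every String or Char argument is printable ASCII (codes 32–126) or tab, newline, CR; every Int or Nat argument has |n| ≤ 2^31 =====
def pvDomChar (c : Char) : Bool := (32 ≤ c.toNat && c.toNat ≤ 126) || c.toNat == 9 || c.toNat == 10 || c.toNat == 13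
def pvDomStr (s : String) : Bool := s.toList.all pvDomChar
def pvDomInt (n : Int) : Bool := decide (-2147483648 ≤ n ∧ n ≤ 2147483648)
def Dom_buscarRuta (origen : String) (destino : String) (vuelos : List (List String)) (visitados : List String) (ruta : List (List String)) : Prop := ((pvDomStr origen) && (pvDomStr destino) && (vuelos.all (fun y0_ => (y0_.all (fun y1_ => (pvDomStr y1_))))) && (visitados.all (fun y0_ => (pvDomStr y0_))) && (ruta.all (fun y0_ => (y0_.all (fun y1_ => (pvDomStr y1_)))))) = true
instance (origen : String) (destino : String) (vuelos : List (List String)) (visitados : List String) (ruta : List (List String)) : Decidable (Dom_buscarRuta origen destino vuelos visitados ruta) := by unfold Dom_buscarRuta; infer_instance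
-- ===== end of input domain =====

-- B replaces A's recursive re-scan of the whole flight list (and O(n) list membership) per node by an
-- iterative DFS over a precomputed adjacency dict with a seen set; equivalence is about the RETURN value
-- only (A mutates `visitados`/`ruta` in place, B does not).

-- vuelo[i] (both ports read flight components this way; Pre_ keeps every flight at length ≥ 2,
-- so the `getD ""` default is never the value Python would have raised on)
def pvGetS (v : List String) (i : Int) : String := (PySem.List.pyGet? v i).getD ""

-- ===== PORT A =====
-- A's recursion threads the shared mutable state (visitados, ruta) through every call;
-- `fuel` is only a totality guard (fuel = vuelos.length + 1 is never exhausted: each nested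
-- recursive call visits a fresh flight destination).
mutual
def pvA_go (destino : String) (vuelosAll : List (List String)) (origen : String)
    (vis : List String) (ruta : List (List String)) (fuel : Nat) :
    Bool × List String × List (List String) :=
  match fuel with
  | 0 => (false, vis, ruta)   -- totality guard, unreachable at the fuel used below
  | Nat.succ f =>
    let vis1 := vis ++ [origen]            -- visitados.append(origen)
    if origen = destino then (true, vis1, ruta)
    else pvA_loop destino vuelosAll origen vuelosAll vis1 ruta f
termination_by (fuel, 0)

def pvA_loop (destino : String) (vuelosAll : List (List String)) (origen : String)
    (rest : List (List String)) (vis : List String) (ruta : List (List String)) (fuel : Nat) :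
    Bool × List String × List (List String) :=
  match rest with
  | [] => (false, vis, ruta)
  | v :: rs =>
    if pvGetS v 0 = origen ∧ pvGetS v 1 ∉ vis then
      match pvA_go destino vuelosAll (pvGetS v 1) vis (ruta ++ [v]) fuel with
      | (true, vis', ruta') => (true, vis', ruta')
      | (false, vis', ruta') =>
        -- ruta.pop(): the recursive call returns ruta' = ruta ++ [v] unchanged on failure, so
        -- dropLast is exactly Python's pop of the element appended above
        pvA_loop destino vuelosAll origen rs vis' ruta'.dropLast fuel
    else pvA_loop destino vuelosAll origen rs vis ruta fuel
termination_by (fuel, rest.length + 1)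
end

def buscarRuta (origen : String) (destino : String) (vuelos : List (List String))
    (visitados : List String) (ruta : List (List String)) : Bool :=
  (pvA_go destino vuelos origen visitados ruta (vuelos.length + 1)).1

-- ===== PORT B =====
-- adj = {}; for v in vuelos: adj.setdefault(v[0], []).append(v[1])
def pvB_adj (vuelos : List (List String)) : PySem.Dict String (List String) :=
  vuelos.foldl (fun d v => d.modify (pvGetS v 0) [] (fun l => l ++ [pvGetS v 1])) PySem.Dict.empty

-- the inner `for nxt in adj.get(node, [])`: none = `return True` was hit, some = updated (seen, stack)
def pvB_scan (destino : String) : List String → PySem.Set String → List String →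
    Option (PySem.Set String × List String)
  | [], seen, stack => some (seen, stack)
  | nxt :: ns, seen, stack =>
    if PySem.Set.contains seen nxt then pvB_scan destino ns seen stack
    else if nxt = destino then none
    else pvB_scan destino ns (PySem.Set.add seen nxt) (nxt :: stack)

-- the `while stack:` loop; the stack is stored top-first (Python's append/pop() at the right end
-- are cons/head here); `fuel` is only a totality guard (each iteration pops one entry and every
-- push marks a fresh node seen, so vuelos.length + 1 iterations always suffice)
def pvB_while (destino : String) (adj : PySem.Dict String (List String)) :
    List String → PySem.Set String → Nat → Bool
  | [], _, _ => false
  | _ :: _, _, 0 => false   -- totality guard, unreachable at the fuel used below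
  | node :: stack, seen, Nat.succ f =>
    match pvB_scan destino (adj.getD node []) seen stack with
    | none => true
    | some (seen', stack') => pvB_while destino adj stack' seen' f

def buscarRuta_alt (origen : String) (destino : String) (vuelos : List (List String))
    (visitados : List String) (ruta : List (List String)) : Bool :=
  if origen = destino then true
  else pvB_while destino (pvB_adj vuelos) [origen]
        (PySem.Set.add (PySem.Set.ofList visitados) origen) (vuelos.length + 1)

-- ===== PRECONDITION & SPEC =====
-- Pre_ excludes inputs (with origen ≠ destino, so the flight list is actually read) containing a
-- flight with fewer than 2 entries: on such flights Python A raises IndexError whenever the flight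
-- is examined past its length (and A only returns when the short flight is never matched), while
-- B reads v[0] and v[1] of every flight up front and raises there. (Both ports totalise the
-- indexing with a `getD ""` default in `pvGetS`, so the agreement theorem below happens to hold
-- on all inputs; Pre_ marks where the ports are faithful to the Pythons.)
def Pre_buscarRuta (origen : String) (destino : String) (vuelos : List (List String)) (visitados : List String) (ruta : List (List String)) : Prop :=
  origen = destino ∨ ∀ v ∈ vuelos, 2 ≤ v.length
instance (origen : String) (destino : String) (vuelos : List (List String)) (visitados : List String) (ruta : List (List String)) : Decidable (Pre_buscarRuta origen destino vuelos visitados ruta) := by unfold Pre_buscarRuta; infer_instance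

def pvWitness_buscarRuta : String × String × List (List String) × List String × List (List String) :=
  ("A", "C", [["A", "B"], ["B", "C"]], [], [])

def Spec_buscarRuta (origen : String) (destino : String) (vuelos : List (List String)) (visitados : List String) (ruta : List (List String)) (out : Bool) : Prop := out = buscarRuta_alt origen destino vuelos visitados ruta
instance (origen : String) (destino : String) (vuelos : List (List String)) (visitados : List String) (ruta : List (List String)) (out : Bool) : Decidable (Spec_buscarRuta origen destino vuelos visitados ruta out) := by unfold Spec_buscarRuta; infer_instance

-- ===== CLAIM (what is proved, stated in full; the proofs are below) =====
def Claim_equal_buscarRuta : Prop := ∀ (origen : String) (destino : String) (vuelos : List (List String)) (visitados : List String) (ruta : List (List String)), Dom_buscarRuta origen destino vuelos visitados ruta → Pre_buscarRuta origen destino vuelos visitados ruta → Spec_buscarRuta origen destino vuelos visitados ruta (buscarRuta origen destino vuelos visitados ruta)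

-- ===== LEMMAS AND PROOFS =====

-- Both ports decide the same proposition: "destino is reachable from origen along vuelos,
-- stepping only onto destinations not in visitados".
inductive pvReach (V : List (List String)) (vis : List String) : String → String → Prop
  | refl (a : String) : pvReach V vis a a
  | step (a b : String) (v : List String) (hv : v ∈ V) (hsrc : pvGetS v 0 = a)
      (hnv : pvGetS v 1 ∉ vis) (h : pvReach V vis (pvGetS v 1) b) : pvReach V vis a b

-- number of flight destinations not yet visited (the fuel measure)
def pvCardS (V : List (List String)) (vis : List String) : Nat :=
  (V.map (fun v => pvGetS v 1)).countP (fun x => decide (x ∉ vis))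

lemma pvCardS_le_len (V : List (List String)) (vis : List String) : pvCardS V vis ≤ V.length := by
  unfold pvCardS
  exact le_trans List.countP_le_length (by simp)

lemma pvCardS_mono {vis vis' : List String} (V : List (List String))
    (h : ∀ y ∈ vis, y ∈ vis') : pvCardS V vis' ≤ pvCardS V vis := by
  unfold pvCardS
  refine List.countP_mono_left ?_
  intro x _ hx
  simp only [decide_eq_true_eq] at hx ⊢
  exact fun hm => hx (h x hm)

lemma pvCardS_append_lt {x : String} {vis : List String} {V : List (List String)}
    (hx : x ∈ V.map (fun v => pvGetS v 1)) (hnx : x ∉ vis) :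
    pvCardS V (vis ++ [x]) < pvCardS V vis := by
  unfold pvCardS
  have hgen : ∀ l : List String, x ∈ l →
      l.countP (fun y => decide (y ∉ vis ++ [x])) < l.countP (fun y => decide (y ∉ vis)) := by
    intro l hx
    induction l with
    | nil => simp at hx
    | cons a t ih =>
      rw [List.countP_cons, List.countP_cons]
      rcases List.mem_cons.1 hx with heq | hxt
      · subst heq
        have h1 : (decide (x ∉ vis ++ [x])) = false := by simp
        have h2 : (decide (x ∉ vis)) = true := by simpa using hnx
        have hle : t.countP (fun y => decide (y ∉ vis ++ [x])) ≤ t.countP (fun y => decide (y ∉ vis)) := by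
          refine List.countP_mono_left ?_
          intro y _ hy
          simp only [decide_eq_true_eq, List.mem_append, List.mem_singleton] at hy ⊢
          exact fun hm => hy (Or.inl hm)
        rw [h1, h2]
        simp only [Bool.false_eq_true, if_false, if_true]
        omega
      · have hcase : (if decide (a ∉ vis ++ [x]) = true then 1 else 0) ≤
            (if decide (a ∉ vis) = true then 1 else 0) := by
          by_cases hav : a ∈ vis
          · simp [hav]
          · by_cases hax : a = x
            · simp [hax, hnx]
            · simp [hav, hax]
        exact Nat.add_lt_add_of_lt_of_le (ih hxt) hcase
  exact hgen _ hx

lemma pvReach_mono {V : List (List String)} {vis vis' : List String} {a b : String}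
    (hsub : ∀ y ∈ vis, y ∈ vis') (h : pvReach V vis' a b) : pvReach V vis a b := by
  induction h with
  | refl a => exact pvReach.refl a
  | step a b v hv hsrc hnv _ ih =>
    exact pvReach.step a b v hv hsrc (fun hm => hnv (hsub _ hm)) ih

lemma pvReach_snoc {V : List (List String)} {vis : List String} {a b : String} {v : List String}
    (h : pvReach V vis a b) (hv : v ∈ V) (hsrc : pvGetS v 0 = b) (hnv : pvGetS v 1 ∉ vis) :
    pvReach V vis a (pvGetS v 1) := by
  induction h with
  | refl a => exact pvReach.step a (pvGetS v 1) v hv hsrc hnv (pvReach.refl _)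
  | step a b w hw hsrcw hnw _ ih => exact pvReach.step a _ w hw hsrcw hnw (ih hsrc)

-- a "closed, destino-free" set of nodes blocks every path
lemma pvNoReach {V : List (List String)} {visit : List String} {o d : String} {T : List String}
    (hod : o ≠ d)
    (hcl : ∀ x ∈ T, (x ∉ visit ∨ x = o) → ∀ v ∈ V, pvGetS v 0 = x → pvGetS v 1 ∈ T)
    (hnd : ∀ x ∈ T, x ∉ visit → x ≠ d)
    {a : String} (ha : a ∈ T) (hcond : a ∉ visit ∨ a = o)
    (hr : pvReach V visit a d) : False := by
  revert hod hnd ha hcond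
  induction hr with
  | refl a =>
    intro hod hnd ha hcond
    rcases hcond with hnv | heq
    · exact (hnd a ha hnv) rfl
    · exact hod heq.symm
  | step a b v hv hsrc hnv _ ih =>
    intro hod hnd ha hcond
    exact ih hod hnd (hcl a ha hcond v hv hsrc) (Or.inl hnv)

-- ---- A side ----

def pvAGoPrefix (f : Nat) : Prop :=
  ∀ d V o vis r, vis <+: (pvA_go d V o vis r f).2.1
def pvALoopPrefix (f : Nat) : Prop :=
  ∀ d V o rest vis r, vis <+: (pvA_loop d V o rest vis r f).2.1

lemma pvA_loop_prefix_of_go {f : Nat} (hgo : pvAGoPrefix f) : pvALoopPrefix f := by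
  intro d V o rest
  induction rest with
  | nil => intro vis r; simp [pvA_loop]
  | cons v rs ih =>
    intro vis r
    by_cases hc : pvGetS v 0 = o ∧ pvGetS v 1 ∉ vis
    · rcases hres : pvA_go d V (pvGetS v 1) vis (r ++ [v]) f with ⟨b, vis2, r2⟩
      have hpre : vis <+: vis2 := by
        have := hgo d V (pvGetS v 1) vis (r ++ [v])
        rwa [hres] at this
      cases b
      · have heq : pvA_loop d V o (v :: rs) vis r f = pvA_loop d V o rs vis2 r2.dropLast f := by
          simp [pvA_loop, hc, hres]
        rw [heq]
        exact hpre.trans (ih vis2 r2.dropLast)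
      · have heq : pvA_loop d V o (v :: rs) vis r f = (true, vis2, r2) := by
          simp [pvA_loop, hc, hres]
        rw [heq]
        exact hpre
    · have heq : pvA_loop d V o (v :: rs) vis r f = pvA_loop d V o rs vis r f := by
        simp only [pvA_loop, if_neg hc]
      rw [heq]
      exact ih vis r

lemma pvA_go_prefix_succ {f : Nat} (hloop : pvALoopPrefix f) : pvAGoPrefix (f + 1) := by
  intro d V o vis r
  by_cases hod : o = d
  · simp [pvA_go, hod]
  · have heq : pvA_go d V o vis r (f + 1) = pvA_loop d V o V (vis ++ [o]) r f := by
      simp [pvA_go, hod]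
    rw [heq]
    exact (List.prefix_append vis [o]).trans (hloop d V o V (vis ++ [o]) r)

lemma pvA_prefix (f : Nat) : pvAGoPrefix f ∧ pvALoopPrefix f := by
  induction f with
  | zero =>
    have hg : pvAGoPrefix 0 := by intro d V o vis r; simp [pvA_go]
    exact ⟨hg, pvA_loop_prefix_of_go hg⟩
  | succ f ih =>
    have hg := pvA_go_prefix_succ ih.2
    exact ⟨hg, pvA_loop_prefix_of_go hg⟩

def pvAGoSound (f : Nat) : Prop :=
  ∀ d V o vis r, (pvA_go d V o vis r f).1 = true → pvReach V vis o d
def pvALoopSound (f : Nat) : Prop :=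
  ∀ d V o rest vis r, rest ⊆ V → (pvA_loop d V o rest vis r f).1 = true → pvReach V vis o d

lemma pvA_loop_sound_of_go {f : Nat} (hgo : pvAGoSound f) : pvALoopSound f := by
  intro d V o rest
  induction rest with
  | nil => intro vis r _ htrue; simp [pvA_loop] at htrue
  | cons v rs ih =>
    intro vis r hsub htrue
    by_cases hc : pvGetS v 0 = o ∧ pvGetS v 1 ∉ vis
    · rcases hres : pvA_go d V (pvGetS v 1) vis (r ++ [v]) f with ⟨b, vis2, r2⟩
      have hpre : vis <+: vis2 := by
        have := (pvA_prefix f).1 d V (pvGetS v 1) vis (r ++ [v])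
        rwa [hres] at this
      cases b
      · have heq : pvA_loop d V o (v :: rs) vis r f = pvA_loop d V o rs vis2 r2.dropLast f := by
          simp [pvA_loop, hc, hres]
        rw [heq] at htrue
        have := ih vis2 r2.dropLast (fun w hw => hsub (List.mem_cons_of_mem _ hw)) htrue
        exact pvReach_mono (fun y hy => hpre.subset hy) this
      · have hreach : pvReach V vis (pvGetS v 1) d := by
          apply hgo d V (pvGetS v 1) vis (r ++ [v])
          rw [hres]
        exact pvReach.step o d v (hsub (List.mem_cons_self)) hc.1 hc.2 hreach
    · have heq : pvA_loop d V o (v :: rs) vis r f = pvA_loop d V o rs vis r f := by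
        simp only [pvA_loop, if_neg hc]
      rw [heq] at htrue
      exact ih vis r (fun w hw => hsub (List.mem_cons_of_mem _ hw)) htrue

lemma pvA_go_sound_succ {f : Nat} (hloop : pvALoopSound f) : pvAGoSound (f + 1) := by
  intro d V o vis r htrue
  by_cases hod : o = d
  · exact hod ▸ pvReach.refl o
  · have heq : pvA_go d V o vis r (f + 1) = pvA_loop d V o V (vis ++ [o]) r f := by
      simp [pvA_go, hod]
    rw [heq] at htrue
    have := hloop d V o V (vis ++ [o]) r (fun w hw => hw) htrue
    exact pvReach_mono (fun y hy => List.mem_append_left _ hy) this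

lemma pvA_sound (f : Nat) : pvAGoSound f ∧ pvALoopSound f := by
  induction f with
  | zero =>
    have hg : pvAGoSound 0 := by intro d V o vis r h; simp [pvA_go] at h
    exact ⟨hg, pvA_loop_sound_of_go hg⟩
  | succ f ih =>
    have hg := pvA_go_sound_succ ih.2
    exact ⟨hg, pvA_loop_sound_of_go hg⟩

def pvAGoComplete (f : Nat) : Prop :=
  ∀ d V o vis r, pvCardS V (vis ++ [o]) < f → (pvA_go d V o vis r f).1 = false →
    o ≠ d ∧ o ∈ (pvA_go d V o vis r f).2.1 ∧
    (∀ x ∈ (pvA_go d V o vis r f).2.1, x ∉ vis ++ [o] →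
      x ≠ d ∧ ∀ v ∈ V, pvGetS v 0 = x → pvGetS v 1 ∈ (pvA_go d V o vis r f).2.1) ∧
    (∀ v ∈ V, pvGetS v 0 = o → pvGetS v 1 ∈ (pvA_go d V o vis r f).2.1)
def pvALoopComplete (f : Nat) : Prop :=
  ∀ d V o rest vis r, pvCardS V vis ≤ f → rest ⊆ V → (pvA_loop d V o rest vis r f).1 = false →
    (∀ x ∈ (pvA_loop d V o rest vis r f).2.1, x ∉ vis →
      x ≠ d ∧ ∀ v ∈ V, pvGetS v 0 = x → pvGetS v 1 ∈ (pvA_loop d V o rest vis r f).2.1) ∧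
    (∀ v ∈ rest, pvGetS v 0 = o → pvGetS v 1 ∈ (pvA_loop d V o rest vis r f).2.1)

lemma pvA_loop_complete_of_go {f : Nat} (hgo : pvAGoComplete f) : pvALoopComplete f := by
  intro d V o rest
  induction rest with
  | nil =>
    intro vis r _ _ _
    constructor
    · intro x hx hnx
      simp [pvA_loop] at hx
      exact absurd hx hnx
    · intro w hw
      simp at hw
  | cons v rs ih =>
    intro vis r hcard hsub hfalse
    by_cases hc : pvGetS v 0 = o ∧ pvGetS v 1 ∉ vis
    · rcases hres : pvA_go d V (pvGetS v 1) vis (r ++ [v]) f with ⟨b, vis2, r2⟩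
      cases b
      · -- recursive call failed; continue with the grown visited list
        have heq : pvA_loop d V o (v :: rs) vis r f = pvA_loop d V o rs vis2 r2.dropLast f := by
          simp [pvA_loop, hc, hres]
        have hdst : pvGetS v 1 ∈ V.map (fun w => pvGetS w 1) :=
          List.mem_map_of_mem (hsub List.mem_cons_self)
        have hcard2 : pvCardS V (vis ++ [pvGetS v 1]) < f :=
          lt_of_lt_of_le (pvCardS_append_lt hdst hc.2) hcard
        have hgofalse : (pvA_go d V (pvGetS v 1) vis (r ++ [v]) f).1 = false := by rw [hres]
        obtain ⟨hne, hmem2, C3g, C4g⟩ := hgo d V (pvGetS v 1) vis (r ++ [v]) hcard2 hgofalse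
        rw [hres] at hmem2 C3g C4g
        have hpre : vis <+: vis2 := by
          have := (pvA_prefix f).1 d V (pvGetS v 1) vis (r ++ [v])
          rwa [hres] at this
        have hcard3 : pvCardS V vis2 ≤ f :=
          le_trans (pvCardS_mono V (fun y hy => hpre.subset hy)) hcard
        rw [heq] at hfalse ⊢
        obtain ⟨C1l, C2l⟩ := ih vis2 r2.dropLast hcard3
          (fun w hw => hsub (List.mem_cons_of_mem _ hw)) hfalse
        have hpre2 : vis2 <+: (pvA_loop d V o rs vis2 r2.dropLast f).2.1 :=
          (pvA_prefix f).2 d V o rs vis2 r2.dropLast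
        constructor
        · intro x hx hnx
          by_cases hx2 : x ∈ vis2
          · by_cases hxd : x = pvGetS v 1
            · subst hxd
              exact ⟨hne, fun w hw hs => hpre2.subset (C4g w hw hs)⟩
            · have hx3 : x ∉ vis ++ [pvGetS v 1] := by
                simp only [List.mem_append, List.mem_singleton]
                rintro (h | h)
                · exact hnx h
                · exact hxd h
              obtain ⟨hxd', hcl'⟩ := C3g x hx2 hx3
              exact ⟨hxd', fun w hw hs => hpre2.subset (hcl' w hw hs)⟩
          · exact C1l x hx hx2
        · intro w hw hs
          rcases List.mem_cons.1 hw with heqw | hw'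
          · subst heqw
            exact hpre2.subset hmem2
          · exact C2l w hw' hs
      · -- the recursive call succeeded: the loop returns true, contradiction
        have heq : (pvA_loop d V o (v :: rs) vis r f).1 = true := by
          simp [pvA_loop, hc, hres]
        rw [heq] at hfalse
        exact absurd hfalse (by simp)
    · have heq : pvA_loop d V o (v :: rs) vis r f = pvA_loop d V o rs vis r f := by
        simp only [pvA_loop, if_neg hc]
      rw [heq] at hfalse ⊢
      obtain ⟨C1l, C2l⟩ := ih vis r hcard (fun w hw => hsub (List.mem_cons_of_mem _ hw)) hfalse
      constructor
      · exact C1l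
      · intro w hw hs
        rcases List.mem_cons.1 hw with heqw | hw'
        · subst heqw
          have hin : pvGetS w 1 ∈ vis := by
            by_contra hnin
            exact hc ⟨hs, hnin⟩
          exact ((pvA_prefix f).2 d V o rs vis r).subset hin
        · exact C2l w hw' hs

lemma pvA_go_complete_succ {f : Nat} (hloop : pvALoopComplete f) : pvAGoComplete (f + 1) := by
  intro d V o vis r hcard hfalse
  by_cases hod : o = d
  · have : (pvA_go d V o vis r (f + 1)).1 = true := by simp [pvA_go, hod]
    rw [this] at hfalse
    exact absurd hfalse (by simp)
  · have heq : pvA_go d V o vis r (f + 1) = pvA_loop d V o V (vis ++ [o]) r f := by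
      simp [pvA_go, hod]
    rw [heq] at hfalse ⊢
    obtain ⟨C1l, C2l⟩ := hloop d V o V (vis ++ [o]) r (Nat.lt_succ_iff.1 hcard)
      (fun w hw => hw) hfalse
    refine ⟨hod, ?_, C1l, C2l⟩
    exact ((pvA_prefix f).2 d V o V (vis ++ [o]) r).subset
      (List.mem_append_right _ (List.mem_singleton_self o))

lemma pvA_complete (f : Nat) : pvAGoComplete f ∧ pvALoopComplete f := by
  induction f with
  | zero =>
    have hg : pvAGoComplete 0 := by intro d V o vis r hcard; omega
    exact ⟨hg, pvA_loop_complete_of_go hg⟩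
  | succ f ih =>
    have hg := pvA_go_complete_succ ih.2
    exact ⟨hg, pvA_loop_complete_of_go hg⟩

-- A's return value decides reachability
lemma pvA_char (d : String) (V : List (List String)) (o : String) (vis : List String)
    (r : List (List String)) :
    buscarRuta o d V vis r = true ↔ pvReach V vis o d := by
  unfold buscarRuta
  constructor
  · exact fun h => (pvA_sound (V.length + 1)).1 d V o vis r h
  · intro hr
    by_contra hfalse
    have hf : (pvA_go d V o vis r (V.length + 1)).1 = false := by
      cases h : (pvA_go d V o vis r (V.length + 1)).1
      · rfl
      · exact absurd h hfalse
    have hcard : pvCardS V (vis ++ [o]) < V.length + 1 :=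
      Nat.lt_succ_of_le (pvCardS_le_len V (vis ++ [o]))
    obtain ⟨hne, hmem, C3, C4⟩ := (pvA_complete (V.length + 1)).1 d V o vis r hcard hf
    refine pvNoReach hne ?_ ?_ hmem (Or.inr rfl) hr
    · intro x hx hcond w hw hs
      by_cases hxo : x = o
      · exact C4 w hw (hxo ▸ hs)
      · rcases hcond with hnv | heq
        · have hx3 : x ∉ vis ++ [o] := by
            simp only [List.mem_append, List.mem_singleton]
            rintro (h | h)
            · exact hnv h
            · exact hxo h
          exact (C3 x hx hx3).2 w hw hs
        · exact absurd heq hxo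
    · intro x hx hnv
      by_cases hxo : x = o
      · exact hxo ▸ hne
      · have hx3 : x ∉ vis ++ [o] := by
          simp only [List.mem_append, List.mem_singleton]
          rintro (h | h)
          · exact hnv h
          · exact hxo h
        exact (C3 x hx hx3).1

-- ---- B side ----

lemma pvB_adj_getD (V : List (List String)) (node : String) :
    (pvB_adj V).getD node [] = (V.filter (fun v => pvGetS v 0 == node)).map (fun v => pvGetS v 1) := by
  unfold pvB_adj
  have h : V.foldl (fun d v => d.modify (pvGetS v 0) [] (fun l => l ++ [pvGetS v 1])) PySem.Dict.empty
      = (V.map (fun v => (pvGetS v 0, pvGetS v 1))).foldl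
          (fun d p => d.modify p.1 [] (fun l => l ++ [p.2])) PySem.Dict.empty := by
    rw [List.foldl_map]
  rw [h, PySem.Dict.getD_foldl_modify_append]
  simp [List.filter_map, List.map_map, Function.comp_def]

lemma pvB_adj_mem {V : List (List String)} {node nxt : String} :
    nxt ∈ (pvB_adj V).getD node [] ↔ ∃ v ∈ V, pvGetS v 0 = node ∧ pvGetS v 1 = nxt := by
  rw [pvB_adj_getD]
  simp only [List.mem_map, List.mem_filter, beq_iff_eq]
  constructor
  · rintro ⟨v, ⟨hv, hs⟩, hd⟩
    exact ⟨v, hv, hs, hd⟩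
  · rintro ⟨v, hv, hs, hd⟩
    exact ⟨v, ⟨hv, hs⟩, hd⟩

lemma pvB_scan_none {d : String} : ∀ (ns : List String) (seen : PySem.Set String)
    (stack : List String), pvB_scan d ns seen stack = none →
    ∃ nxt ∈ ns, nxt = d ∧ nxt ∉ seen := by
  intro ns
  induction ns with
  | nil => intro seen stack h; simp [pvB_scan] at h
  | cons nxt ns ih =>
    intro seen stack h
    by_cases hc : PySem.Set.contains seen nxt = true
    · rw [pvB_scan, if_pos hc] at h
      obtain ⟨m, hm, hmd, hmn⟩ := ih seen stack h
      exact ⟨m, List.mem_cons_of_mem _ hm, hmd, hmn⟩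
    · have hns : nxt ∉ seen := fun hm => hc ((PySem.Set.contains_iff seen nxt).2 hm)
      by_cases hnd : nxt = d
      · exact ⟨nxt, List.mem_cons_self, hnd, hns⟩
      · rw [pvB_scan, if_neg hc, if_neg hnd] at h
        obtain ⟨m, hm, hmd, hmn⟩ := ih _ _ h
        refine ⟨m, List.mem_cons_of_mem _ hm, hmd, fun hms => hmn ?_⟩
        exact (PySem.Set.mem_add _ _ _).2 (Or.inl hms)

lemma pvB_scan_some {d : String} {V : List (List String)} :
    ∀ (ns : List String) (seen : PySem.Set String) (stack : List String)
      (seen' : PySem.Set String) (stack' : List String),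
    pvB_scan d ns seen stack = some (seen', stack') →
    (∀ x ∈ seen, x ∈ seen') ∧
    (∀ x ∈ ns, x ∈ seen') ∧
    (∀ n ∈ stack, n ∈ stack') ∧
    (∀ n ∈ stack', n ∈ stack ∨ (n ∈ ns ∧ n ∉ seen)) ∧
    (∀ x ∈ seen', x ∈ seen ∨ (x ∈ ns ∧ x ≠ d ∧ x ∈ stack')) ∧
    ((∀ x ∈ ns, x ∈ V.map (fun v => pvGetS v 1)) →
      stack'.length + pvCardS V seen' ≤ stack.length + pvCardS V seen) := by
  intro ns
  induction ns with
  | nil =>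
    intro seen stack seen' stack' h
    rw [pvB_scan] at h
    injection h with h
    injection h with h1 h2
    subst h1; subst h2
    exact ⟨fun x hx => hx, by simp, fun n hn => hn, fun n hn => Or.inl hn,
      fun x hx => Or.inl hx, fun _ => le_refl _⟩
  | cons nxt ns ih =>
    intro seen stack seen' stack' h
    by_cases hc : PySem.Set.contains seen nxt = true
    · rw [pvB_scan, if_pos hc] at h
      have hmem : nxt ∈ seen := (PySem.Set.contains_iff seen nxt).1 hc
      obtain ⟨i1, i2, i3, i4, i5, i6⟩ := ih seen stack seen' stack' h
      refine ⟨i1, ?_, i3, ?_, ?_, ?_⟩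
      · intro x hx
        rcases List.mem_cons.1 hx with rfl | hx'
        · exact i1 _ hmem
        · exact i2 _ hx'
      · intro n hn
        rcases i4 n hn with h' | ⟨h1, h2⟩
        · exact Or.inl h'
        · exact Or.inr ⟨List.mem_cons_of_mem _ h1, h2⟩
      · intro x hx
        rcases i5 x hx with h' | ⟨h1, h2, h3⟩
        · exact Or.inl h'
        · exact Or.inr ⟨List.mem_cons_of_mem _ h1, h2, h3⟩
      · intro hdest
        exact i6 (fun x hx => hdest x (List.mem_cons_of_mem _ hx))
    · have hns : nxt ∉ seen := fun hm => hc ((PySem.Set.contains_iff seen nxt).2 hm)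
      by_cases hnd : nxt = d
      · rw [pvB_scan, if_neg hc, if_pos hnd] at h
        exact absurd h (by simp)
      · rw [pvB_scan, if_neg hc, if_neg hnd] at h
        obtain ⟨i1, i2, i3, i4, i5, i6⟩ := ih (PySem.Set.add seen nxt) (nxt :: stack) seen' stack' h
        have hsub2 : ∀ x ∈ seen, x ∈ seen' := fun x hx => i1 x ((PySem.Set.mem_add _ _ _).2 (Or.inl hx))
        have hnxtstack : nxt ∈ stack' := i3 _ List.mem_cons_self
        refine ⟨hsub2, ?_, ?_, ?_, ?_, ?_⟩
        · intro x hx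
          rcases List.mem_cons.1 hx with rfl | hx'
          · exact i1 _ ((PySem.Set.mem_add _ _ _).2 (Or.inr rfl))
          · exact i2 _ hx'
        · exact fun n hn => i3 _ (List.mem_cons_of_mem _ hn)
        · intro n hn
          rcases i4 n hn with h' | ⟨h1, h2⟩
          · rcases List.mem_cons.1 h' with rfl | h''
            · exact Or.inr ⟨List.mem_cons_self, hns⟩
            · exact Or.inl h''
          · refine Or.inr ⟨List.mem_cons_of_mem _ h1, fun hm => h2 ?_⟩
            exact (PySem.Set.mem_add _ _ _).2 (Or.inl hm)
        · intro x hx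
          rcases i5 x hx with h' | ⟨h1, h2, h3⟩
          · rcases (PySem.Set.mem_add _ _ _).1 h' with h'' | rfl
            · exact Or.inl h''
            · exact Or.inr ⟨List.mem_cons_self, hnd, hnxtstack⟩
          · exact Or.inr ⟨List.mem_cons_of_mem _ h1, h2, h3⟩
        · intro hdest
          have hadd : PySem.Set.add seen nxt = seen ++ [nxt] := PySem.Set.add_of_not_mem hns
          have hlt : pvCardS V (PySem.Set.add seen nxt) < pvCardS V seen := by
            rw [hadd]
            exact pvCardS_append_lt (hdest nxt List.mem_cons_self) hns
          have h6 := i6 (fun x hx => hdest x (List.mem_cons_of_mem _ hx))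
          simp only [List.length_cons] at h6
          omega

lemma pvB_while_sound {d : String} {V : List (List String)} {visit : List String} {o : String}
    (hod : o ≠ d) :
    ∀ (f : Nat) (stack : List String) (seen : PySem.Set String),
    (∀ x ∈ visit, x ∈ seen) →
    (∀ n ∈ stack, pvReach V visit o n) →
    pvB_while d (pvB_adj V) stack seen f = true → pvReach V visit o d := by
  intro f
  induction f with
  | zero =>
    intro stack seen _ _ htrue
    cases stack <;> simp [pvB_while] at htrue
  | succ f ih =>
    intro stack seen hseen hstack htrue
    cases stack with
    | nil => simp [pvB_while] at htrue
    | cons node rest =>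
      rcases hscan : pvB_scan d ((pvB_adj V).getD node []) seen rest with _ | ⟨seen2, stack2⟩
      · obtain ⟨nxt, hmem, rfl, hnseen⟩ := pvB_scan_none _ _ _ hscan
        obtain ⟨v, hv, hsrc, hdst⟩ := pvB_adj_mem.1 hmem
        have hnvisit : pvGetS v 1 ∉ visit := fun hm => hnseen (hdst ▸ hseen _ hm)
        exact hdst ▸ pvReach_snoc (hstack node List.mem_cons_self) hv hsrc hnvisit
      · rw [pvB_while, hscan] at htrue
        obtain ⟨i1, _, _, i4, _, _⟩ := pvB_scan_some (V := V) _ _ _ _ _ hscan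
        refine ih stack2 seen2 (fun x hx => i1 x (hseen x hx)) ?_ htrue
        intro n hn
        rcases i4 n hn with h' | ⟨h1, h2⟩
        · exact hstack n (List.mem_cons_of_mem _ h')
        · obtain ⟨v, hv, hsrc, hdst⟩ := pvB_adj_mem.1 h1
          have hnvisit : pvGetS v 1 ∉ visit := fun hm => h2 (hdst ▸ hseen _ hm)
          exact hdst ▸ pvReach_snoc (hstack node List.mem_cons_self) hv hsrc hnvisit

lemma pvB_while_complete {d : String} {V : List (List String)} {visit : List String} {o : String}
    (hod : o ≠ d) :
    ∀ (f : Nat) (stack : List String) (seen : PySem.Set String),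
    (∀ x ∈ visit, x ∈ seen) →
    (o ∈ seen) →
    (∀ x ∈ seen, x ∉ visit → x ≠ d) →
    (∀ x ∈ seen, (x ∉ visit ∨ x = o) → x ∈ stack ∨ ∀ v ∈ V, pvGetS v 0 = x → pvGetS v 1 ∈ seen) →
    (stack.length + pvCardS V seen ≤ f) →
    pvB_while d (pvB_adj V) stack seen f = false → ¬ pvReach V visit o d := by
  intro f
  induction f with
  | zero =>
    intro stack seen h1 h2 h3 h4 h5 _
    cases stack with
    | nil =>
      intro hr
      refine pvNoReach hod ?_ h3 h2 (Or.inr rfl) hr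
      intro x hx hcond w hw hs
      rcases h4 x hx hcond with h' | hcl
      · simp at h'
      · exact hcl w hw hs
    | cons node rest =>
      exfalso
      simp only [List.length_cons] at h5
      omega
  | succ f ih =>
    intro stack seen h1 h2 h3 h4 h5 hfalse
    cases stack with
    | nil =>
      intro hr
      refine pvNoReach hod ?_ h3 h2 (Or.inr rfl) hr
      intro x hx hcond w hw hs
      rcases h4 x hx hcond with h' | hcl
      · simp at h'
      · exact hcl w hw hs
    | cons node rest =>
      rcases hscan : pvB_scan d ((pvB_adj V).getD node []) seen rest with _ | ⟨seen2, stack2⟩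
      · rw [pvB_while, hscan] at hfalse
        exact absurd hfalse (by simp)
      · rw [pvB_while, hscan] at hfalse
        obtain ⟨i1, i2, i3, i4, i5, i6⟩ := pvB_scan_some (V := V) _ _ _ _ _ hscan
        have hdest : ∀ x ∈ (pvB_adj V).getD node [], x ∈ V.map (fun v => pvGetS v 1) := by
          intro x hx
          obtain ⟨v, hv, _, hdst⟩ := pvB_adj_mem.1 hx
          exact hdst ▸ List.mem_map_of_mem hv
        refine ih stack2 seen2 (fun x hx => i1 x (h1 x hx)) (i1 o h2) ?_ ?_ ?_ hfalse
        · intro x hx hnv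
          rcases i5 x hx with h' | ⟨_, hxd, _⟩
          · exact h3 x h' hnv
          · exact hxd
        · intro x hx hcond
          rcases i5 x hx with h' | ⟨_, _, hst⟩
          · rcases h4 x h' hcond with hms | hcl
            · rcases List.mem_cons.1 hms with rfl | hmr
              · -- x = node: its whole adjacency list is now seen
                refine Or.inr ?_
                intro w hw hs
                refine i2 _ (pvB_adj_mem.2 ⟨w, hw, hs, rfl⟩)
              · exact Or.inl (i3 _ hmr)
            · exact Or.inr (fun w hw hs => i1 _ (hcl w hw hs))
          · exact Or.inl hst
        · have h6 := i6 hdest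
          simp only [List.length_cons] at h5
          omega

-- B's return value decides reachability
lemma pvB_char (d : String) (V : List (List String)) (o : String) (vis : List String)
    (r : List (List String)) :
    buscarRuta_alt o d V vis r = true ↔ pvReach V vis o d := by
  unfold buscarRuta_alt
  by_cases hod : o = d
  · subst hod
    simp [pvReach.refl]
  · rw [if_neg hod]
    have hseen0 : ∀ x ∈ vis, x ∈ PySem.Set.add (PySem.Set.ofList vis) o := by
      intro x hx
      exact (PySem.Set.mem_add _ _ _).2 (Or.inl ((PySem.Set.mem_ofList _ _).2 hx))
    constructor
    · intro htrue
      refine pvB_while_sound hod (V.length + 1) [o] _ hseen0 ?_ htrue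
      intro n hn
      rcases List.mem_cons.1 hn with rfl | h'
      · exact pvReach.refl n
      · simp at h'
    · intro hr
      by_contra hfb
      have hfalse : pvB_while d (pvB_adj V) [o] (PySem.Set.add (PySem.Set.ofList vis) o)
          (V.length + 1) = false := by
        cases h : pvB_while d (pvB_adj V) [o] (PySem.Set.add (PySem.Set.ofList vis) o) (V.length + 1)
        · rfl
        · exact absurd h hfb
      refine pvB_while_complete hod (V.length + 1) [o] _ hseen0
        ((PySem.Set.mem_add _ _ _).2 (Or.inr rfl)) ?_ ?_ ?_ hfalse hr
      · intro x hx hnv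
        rcases (PySem.Set.mem_add _ _ _).1 hx with h' | rfl
        · exact absurd ((PySem.Set.mem_ofList _ _).1 h') hnv
        · exact hod
      · intro x hx _
        rcases (PySem.Set.mem_add _ _ _).1 hx with h' | rfl
        · by_cases hxo : x = o
          · exact Or.inl (hxo ▸ List.mem_cons_self)
          · rcases ‹x ∉ vis ∨ x = o› with hnv | heq
            · exact absurd ((PySem.Set.mem_ofList _ _).1 h') hnv
            · exact absurd heq hxo
        · exact Or.inl List.mem_cons_self
      · have := pvCardS_le_len V (PySem.Set.add (PySem.Set.ofList vis) o)
        simp only [List.length_cons, List.length_nil]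
        omega

-- ===== VERDICT (by name: the statement is the Claim_ definition above) =====
theorem buscarRuta_spec : Claim_equal_buscarRuta := by
  intro o d V vis r _ _
  unfold Spec_buscarRuta
  rcases hb : buscarRuta_alt o d V vis r with _ | _
  · rcases ha : buscarRuta o d V vis r with _ | _
    · rfl
    · exact absurd ((pvB_char d V o vis r).2 ((pvA_char d V o vis r).1 ha)) (by simp [hb])
  · exact (pvA_char d V o vis r).2 ((pvB_char d V o vis r).1 hb)
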